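-- pv_equiv track=rewrite | github.com/christopherhadley/project-googlemapsapi | TravelTimesGoogleMaps.py | group_postcodes
-- ===== SOURCE A (Python) =====
-- def group_postcodes(A, B):
--     # list sizes
--     L1 = len(A)
--     L2 = len(B)
--     # block sizes
--     b1 = 3
--     b2 = 5
--
--     postcodes_grouped = []
--
--     # could probably do this in a lambda function within the range() below:
--     def get_range(L,b):
--         if L % b == 0:
--             return L//b
--         else:
--             return L//b + 1
--
--     for j in range(get_range(L1,b1)):
--         for l in range(get_range(L2,b2)):
--             row = ([A[i] for i in range(b1*j, min(b1*(j+1), b1*j + (L1-b1*j)))],                   [B[k] for k in range(b2*l, min(b2*(l+1), b2*l + (L2-b2*l)))]  )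
--             postcodes_grouped.append(row)
--
--     return postcodes_grouped
-- ===== SOURCE B (Python) =====
-- def group_postcodes(A, B):
--     # Stream both lists once, growing a current chunk element by element and
--     # emitting it when full; no indexing, slicing or ceil-division.
--     cbs = []
--     cur = []
--     for y in B:
--         cur.append(y)
--         if len(cur) == 5:
--             cbs.append(cur)
--             cur = []
--     if cur:
--         cbs.append(cur)
--     out = []
--     cur = []
--     for x in A:
--         cur.append(x)
--         if len(cur) == 3:
--             out.extend((cur, cb) for cb in cbs)
--             cur = []
--     if cur:
--         out.extend((cur, cb) for cb in cbs)
--     return out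
-- ===== Notes on version B (the rewrite author's own statement) =====
-- stated objective: faster
-- what changed: B streams each list once element-by-element with a growing current-chunk accumulator, emitting output rows as each A-chunk completes, instead of A's nested index loops that derive chunk bounds from a ceil-division helper and rebuild the A-chunk element-by-element for every B-chunk.
import Mathlib
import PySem

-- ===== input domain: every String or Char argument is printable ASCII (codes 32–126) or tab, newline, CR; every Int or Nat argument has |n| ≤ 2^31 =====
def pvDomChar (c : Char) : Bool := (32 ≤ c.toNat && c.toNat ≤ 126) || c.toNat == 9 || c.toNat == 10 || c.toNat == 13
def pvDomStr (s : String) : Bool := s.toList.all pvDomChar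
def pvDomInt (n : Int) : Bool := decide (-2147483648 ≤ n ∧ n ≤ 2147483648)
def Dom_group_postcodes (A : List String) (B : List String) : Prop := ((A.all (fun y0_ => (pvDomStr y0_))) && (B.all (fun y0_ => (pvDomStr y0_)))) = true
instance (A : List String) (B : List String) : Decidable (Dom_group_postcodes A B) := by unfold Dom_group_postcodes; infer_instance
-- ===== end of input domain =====

-- B streams each input list once with a growing current-chunk accumulator, emitting output rows
-- as each A-chunk completes, instead of A's nested index loops with a ceil-division bound helper
-- and per-row element-by-element rebuilds (objective: faster by a constant factor / simpler).

-- ===== PORT A =====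
-- get_range(L, b): ceil division via Python's % and //
def pvGetRange (L b : Int) : Int :=
  if PySem.Int.mod L b = 0 then PySem.Int.floordiv L b else PySem.Int.floordiv L b + 1

-- A[i] inside the comprehensions is always in range, so pyGetD with an unused default is exact here.
def group_postcodes (A : List String) (B : List String) : List (List String × List String) :=
  (PySem.List.pyRange 0 (pvGetRange (PySem.List.len A) 3) 1).foldl (fun acc j =>
    (PySem.List.pyRange 0 (pvGetRange (PySem.List.len B) 5) 1).foldl (fun acc2 l =>
      acc2 ++ [((PySem.List.pyRange (3 * j) (min (3 * (j + 1)) (3 * j + (PySem.List.len A - 3 * j))) 1).map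
                  (fun i => PySem.List.pyGetD A i ""),
                (PySem.List.pyRange (5 * l) (min (5 * (l + 1)) (5 * l + (PySem.List.len B - 5 * l))) 1).map
                  (fun k => PySem.List.pyGetD B k ""))]) acc) []

-- ===== PORT B =====
-- transliteration of Source B: two streaming folds with a current-chunk accumulator;
-- `if cur:` after the loop flushes the last partial chunk.
def group_postcodes_alt (A : List String) (B : List String) : List (List String × List String) :=
  let p := B.foldl (fun (s : List (List String) × List String) y =>
      let c := s.2 ++ [y]
      if c.length = 5 then (s.1 ++ [c], ([] : List String)) else (s.1, c)) ([], [])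
  let cbs := if p.2 ≠ [] then p.1 ++ [p.2] else p.1
  let q := A.foldl (fun (s : List (List String × List String) × List String) x =>
      let c := s.2 ++ [x]
      if c.length = 3 then (s.1 ++ cbs.map (fun cb => (c, cb)), ([] : List String)) else (s.1, c)) ([], [])
  if q.2 ≠ [] then q.1 ++ cbs.map (fun cb => (q.2, cb)) else q.1

-- ===== PRECONDITION & SPEC =====
def Spec_group_postcodes (A : List String) (B : List String) (out : List (List String × List String)) : Prop := out = group_postcodes_alt A B
instance (A : List String) (B : List String) (out : List (List String × List String)) : Decidable (Spec_group_postcodes A B out) := by unfold Spec_group_postcodes; infer_instance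

-- ===== CLAIM (what is proved, stated in full; the proofs are below) =====
def Claim_equal_group_postcodes : Prop := ∀ (A : List String) (B : List String), Dom_group_postcodes A B → Spec_group_postcodes A B (group_postcodes A B)

-- ===== LEMMAS AND PROOFS =====

-- canonical chunking into chunks of size n+1 (proof-side specification both ports are reduced to)
def pvChunksRec (n : Nat) : List String → List (List String)
  | [] => []
  | x :: xs => ((x :: xs).take (n + 1)) :: pvChunksRec n ((x :: xs).drop (n + 1))
  termination_by l => l.length
  decreasing_by simp

theorem pvChunksRec_ne_nil (n : Nat) (X : List String) (h : X ≠ []) :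
    pvChunksRec n X = X.take (n + 1) :: pvChunksRec n (X.drop (n + 1)) := by
  cases X with
  | nil => exact absurd rfl h
  | cons x xs => rw [pvChunksRec]

-- reading a contiguous in-range segment by index equals the slice
theorem pv_seg_eq (X : List String) (s e : Int) (hs : 0 ≤ s) (hse : s ≤ e)
    (he : e ≤ PySem.List.len X) :
    (PySem.List.pyRange s e 1).map (fun i => PySem.List.pyGetD X i "") =
      PySem.List.slice X (some s) (some e) := by
  have hfull := PySem.List.map_pyGetD_pyRange X "" hs
  rw [PySem.List.pyRange_one_append s e (PySem.List.len X) hse he, List.map_append] at hfull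
  have hlen : ((PySem.List.pyRange s e 1).map (fun i => PySem.List.pyGetD X i "")).length
      = (e - s).toNat := by
    simp [PySem.List.length_pyRange_one]
  have htake := congrArg (List.take (e - s).toNat) hfull
  rw [List.take_left' hlen] at htake
  rw [htake, PySem.List.slice_toNat X hs (le_trans hs hse)]
  congr 1
  omega

-- one chunk of A's comprehension equals the corresponding slice
theorem pv_chunk_eq (X : List String) (b : Int) (hb : 0 < b) (j : Int) (hj : 0 ≤ j)
    (hjl : b * j < PySem.List.len X) :
    (PySem.List.pyRange (b * j) (min (b * (j + 1)) (b * j + (PySem.List.len X - b * j))) 1).map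
        (fun i => PySem.List.pyGetD X i "") =
      PySem.List.slice X (some (b * j)) (some (b * j + b)) := by
  have hL : (0 : Int) ≤ PySem.List.len X := by
    simp [PySem.List.len]
  have hmin : min (b * (j + 1)) (b * j + (PySem.List.len X - b * j))
      = min (b * j + b) (PySem.List.len X) := by ring_nf
  have hjnn : 0 ≤ b * j := mul_nonneg (le_of_lt hb) hj
  rw [hmin, pv_seg_eq X (b * j) (min (b * j + b) (PySem.List.len X)) hjnn
      (le_min (by omega) (le_of_lt hjl)) (min_le_right _ _)]
  rw [PySem.List.slice_toNat X hjnn (le_trans hjnn (le_min (by omega) (le_of_lt hjl))),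
      PySem.List.slice_toNat X hjnn (by omega)]
  by_cases h : b * j + b ≤ PySem.List.len X
  · rw [min_eq_left h]
  · rw [min_eq_right (by omega)]
    have hdlen : (X.drop (b * j).toNat).length = X.length - (b * j).toNat := List.length_drop
    rw [List.take_of_length_le (by simp [PySem.List.len] at hjl h ⊢),
        List.take_of_length_le (by simp [PySem.List.len] at hjl h ⊢; omega)]

-- the list of A's chunks equals the stepped-range slice table
theorem pv_chunks_eq (X : List String) (b : Int) (hb : 0 < b) :
    (PySem.List.pyRange 0 (pvGetRange (PySem.List.len X) b) 1).map (fun j =>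
        (PySem.List.pyRange (b * j) (min (b * (j + 1)) (b * j + (PySem.List.len X - b * j))) 1).map
          (fun i => PySem.List.pyGetD X i "")) =
      (PySem.List.pyRange 0 (PySem.List.len X) b).map
        (fun i => PySem.List.slice X (some i) (some (i + b))) := by
  have hL : (0 : Int) ≤ PySem.List.len X := by simp [PySem.List.len]
  set L := PySem.List.len X with hLdef
  have hbne : b ≠ 0 := by omega
  have hq := Int.emod_add_mul_ediv L b
  have hr0 : 0 ≤ L % b := Int.emod_nonneg L hbne
  have hrb : L % b < b := Int.emod_lt_of_pos L hb
  have hfd : PySem.Int.floordiv L b = L / b := Int.fdiv_eq_ediv_of_nonneg L (by omega)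
  have hfm : PySem.Int.mod L b = L % b := by
    show Int.fmod L b = L % b
    rw [Int.fmod_eq_emod]
    simp [hb.le]
  have hq2' : (L - 0 + b - 1) / b = (L - 1) / b + 1 := by
    have h : L - 0 + b - 1 = (L - 1) + 1 * b := by ring
    rw [h, Int.add_mul_ediv_right _ _ hbne]
  -- the two range lengths agree
  have hcount : (pvGetRange L b).toNat
      = (if (0 : Int) < L then ((L - 0 + b - 1) / b).toNat else 0) := by
    unfold pvGetRange
    rw [hfd, hfm]
    by_cases hL0 : L = 0
    · rw [hL0]
      simp
    · have hLpos : 0 < L := by omega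
      rw [if_pos hLpos, hq2']
      by_cases hr : L % b = 0
      · obtain ⟨m, hm⟩ := Int.dvd_of_emod_eq_zero hr
        have hqm : L / b = m := by rw [hm, Int.mul_ediv_cancel_left m hbne]
        have hm1 : (L - 1) / b = m - 1 := by
          have h : L - 1 = (b - 1) + b * (m - 1) := by rw [hm]; ring
          rw [h, Int.add_mul_ediv_left _ _ hbne,
              Int.ediv_eq_zero_of_lt (by omega) (by omega)]
          ring
        rw [if_pos hr, hqm, hm1]
        omega
      · have hq' : (L - 1) / b = L / b := by
          have h : L - 1 = (L % b - 1) + b * (L / b) := by omega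
          rw [h, Int.add_mul_ediv_left _ _ hbne,
              Int.ediv_eq_zero_of_lt (by omega) (by omega)]
          omega
        rw [if_neg hr, hq']
  rw [PySem.List.pyRange_one, PySem.List.pyRange_of_pos 0 L hb, List.map_map, List.map_map,
      show pvGetRange L b - 0 = pvGetRange L b from sub_zero _, hcount]
  apply List.map_congr_left
  intro k hk
  rw [List.mem_range] at hk
  -- k < number of chunks ⇒ b * k < L
  have hkL : b * (k : Int) < L := by
    split_ifs at hk with hpos
    · have hq2 := Int.emod_add_mul_ediv (L - 0 + b - 1) b
      have hr0' : 0 ≤ (L - 0 + b - 1) % b := Int.emod_nonneg _ hbne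
      have hrb' : (L - 0 + b - 1) % b < b := Int.emod_lt_of_pos _ hb
      have hk' : (k : Int) ≤ (L - 0 + b - 1) / b - 1 := by omega
      have hmul := mul_le_mul_of_nonneg_left hk' hb.le
      have hexp : b * ((L - 0 + b - 1) / b - 1) = b * ((L - 0 + b - 1) / b) - b := by ring
      omega
    · omega
  have h1 := pv_chunk_eq X b hb (k : Int) (Int.natCast_nonneg k) hkL
  simp only [Function.comp]
  rw [show (0 : Int) + (k : Int) = (k : Int) by ring,
      show (0 : Int) + b * (k : Int) = b * (k : Int) by ring]
  exact h1

-- the stepped-range slice table is the canonical recursive chunking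
theorem pv_table_eq (n : Nat) (b : Int) (hb : b = (n : Int) + 1) (X : List String) :
    (PySem.List.pyRange 0 (PySem.List.len X) b).map
        (fun i => PySem.List.slice X (some i) (some (i + b))) = pvChunksRec n X := by
  have hb0 : 0 < b := by omega
  cases hX : X with
  | nil =>
    rw [show PySem.List.len ([] : List String) = 0 from by simp [PySem.List.len],
        PySem.List.pyRange_of_pos 0 0 hb0]
    simp [pvChunksRec]
  | cons x xs =>
    rw [← hX]
    have hXne : X ≠ [] := by rw [hX]; exact List.cons_ne_nil _ _
    have hLpos : 0 < X.length := by rw [hX]; simp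
    have hlen : PySem.List.len X = (X.length : Int) := by simp [PySem.List.len]
    have IH := pv_table_eq n b hb (X.drop (n + 1))
    have hlen' : PySem.List.len (X.drop (n + 1)) = ((X.length - (n + 1) : Nat) : Int) := by
      simp [PySem.List.len]
    set L : Int := (X.length : Int) with hLdef
    have hbne : b ≠ 0 := by omega
    have hq1 : (L - 0 + b - 1) / b = (L - 1) / b + 1 := by
      have h : L - 0 + b - 1 = (L - 1) + 1 * b := by ring
      rw [h, Int.add_mul_ediv_right _ _ hbne]
    have hqnn : 0 ≤ (L - 1) / b := Int.ediv_nonneg (by omega) (by omega)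
    -- count on X
    have hcnt : (if (0:Int) < L then ((L - 0 + b - 1) / b).toNat else 0)
        = ((L - 1) / b).toNat + 1 := by
      rw [if_pos (by omega), hq1]
      omega
    -- count on X.drop (n+1)
    have hcnt' : (if (0:Int) < ((X.length - (n + 1) : Nat) : Int)
          then ((((X.length - (n + 1) : Nat) : Int) - 0 + b - 1) / b).toNat else 0)
        = ((L - 1) / b).toNat := by
      by_cases hbig : n + 1 < X.length
      · have hL' : ((X.length - (n + 1) : Nat) : Int) = L - b := by push_cast [Nat.cast_sub hbig.le]; omega
        rw [hL', if_pos (by omega)]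
        congr 1
        have h : L - b - 0 + b - 1 = L - 1 := by ring
        rw [h]
      · have hL' : ((X.length - (n + 1) : Nat) : Int) = 0 := by
          have : X.length - (n + 1) = 0 := by omega
          rw [this]; rfl
        rw [hL', if_neg (by omega)]
        have : (L - 1) / b = 0 := Int.ediv_eq_zero_of_lt (by omega) (by omega)
        omega
    rw [PySem.List.pyRange_of_pos 0 (PySem.List.len X) hb0, hlen, hcnt,
        List.map_map, List.range_succ_eq_map, List.map_cons, List.map_map,
        pvChunksRec_ne_nil n X hXne, ← IH,
        PySem.List.pyRange_of_pos 0 (PySem.List.len (X.drop (n + 1))) hb0, hlen', hcnt',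
        List.map_map]
    congr 1
    · -- head chunk
      show PySem.List.slice X (some (0 + b * ((0:Nat):Int))) (some (0 + b * ((0:Nat):Int) + b))
          = X.take (n + 1)
      simp only [Nat.cast_zero, mul_zero, add_zero, zero_add]
      rw [PySem.List.slice_toNat X le_rfl (by omega)]
      simp only [Int.toNat_zero, List.drop_zero, Nat.sub_zero]
      congr 1
      omega
    · -- tail chunks: chunk k+1 of X is chunk k of X.drop (n+1)
      apply List.map_congr_left
      intro k _
      show PySem.List.slice X (some (0 + b * ((k+1:Nat):Int))) (some (0 + b * ((k+1:Nat):Int) + b))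
          = PySem.List.slice (X.drop (n+1)) (some (0 + b * (k:Int))) (some (0 + b * (k:Int) + b))
      have hm0 : (0:Int) ≤ b * (k:Int) := by positivity
      have e1 : 0 + b * ((k+1:Nat):Int) = b * (k:Int) + b := by push_cast; ring
      have e2 : 0 + b * (k:Int) = b * (k:Int) := by ring
      rw [e1, e2]
      set m : Int := b * (k:Int) with hm
      rw [PySem.List.slice_toNat X (by omega) (by omega),
          PySem.List.slice_toNat (X.drop (n+1)) hm0 (by omega),
          List.drop_drop]
      congr 1
      · omega
      · congr 1
        omega
  termination_by X.length
  decreasing_by subst hX; simp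

-- the streaming fold step: append x to the current chunk, emit when it reaches size n+1
def pvStep {γ : Type} (n : Nat) (emit : List String → List γ)
    (s : List γ × List String) (x : String) : List γ × List String :=
  if (s.2 ++ [x]).length = n + 1 then (s.1 ++ emit (s.2 ++ [x]), []) else (s.1, s.2 ++ [x])

-- streaming fold + trailing flush = flatMap emit over the canonical chunking
theorem pv_foldEmit {γ : Type} (n : Nat) (emit : List String → List γ)
    (X : List String) (done : List γ) (cur : List String) (hcur : cur.length ≤ n) :
    (if (X.foldl (pvStep n emit) (done, cur)).2 ≠ []
      then (X.foldl (pvStep n emit) (done, cur)).1 ++ emit (X.foldl (pvStep n emit) (done, cur)).2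
      else (X.foldl (pvStep n emit) (done, cur)).1)
    = done ++ (pvChunksRec n (cur ++ X)).flatMap emit := by
  induction X generalizing done cur with
  | nil =>
    simp only [List.foldl_nil, List.append_nil]
    cases hc : cur with
    | nil => simp [pvChunksRec]
    | cons c cs =>
      rw [← hc]
      have hne : cur ≠ [] := by rw [hc]; exact List.cons_ne_nil _ _
      rw [if_pos hne, pvChunksRec_ne_nil n cur hne,
          List.take_of_length_le (by omega), List.drop_eq_nil_of_le (by omega)]
      simp [pvChunksRec]
  | cons y ys IH =>
    rw [List.foldl_cons]
    by_cases hfull : (cur ++ [y]).length = n + 1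
    · rw [show pvStep n emit (done, cur) y = (done ++ emit (cur ++ [y]), []) from by
        simp only [pvStep]; rw [if_pos hfull]]
      rw [IH (done ++ emit (cur ++ [y])) [] (Nat.zero_le n)]
      have hsplit : cur ++ y :: ys = (cur ++ [y]) ++ ys := by simp
      rw [hsplit, pvChunksRec_ne_nil n ((cur ++ [y]) ++ ys) (by simp),
          List.take_append_of_le_length (by simp [hfull]),
          List.take_of_length_le (show (cur ++ [y]).length ≤ n + 1 by omega),
          List.drop_append_of_le_length (by simp [hfull]),
          List.drop_eq_nil_of_le (show (cur ++ [y]).length ≤ n + 1 by omega)]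
      simp
    · rw [show pvStep n emit (done, cur) y = (done, cur ++ [y]) from by
        simp only [pvStep]; rw [if_neg hfull]]
      rw [IH done (cur ++ [y]) (by simp only [List.length_append, List.length_cons,
        List.length_nil] at hfull ⊢; omega)]
      congr 2
      simp

-- ===== VERDICT (by name: the statement is the Claim_ definition above) =====
theorem group_postcodes_spec : Claim_equal_group_postcodes := by
  intro A B _
  unfold Spec_group_postcodes group_postcodes group_postcodes_alt
  simp only [PySem.List.foldl_append_singleton_eq_map, PySem.List.foldl_append_eq_flatMap,
    List.nil_append]
  have hfB : (fun (s : List (List String) × List String) y =>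
      if (s.2 ++ [y]).length = 5 then (s.1 ++ [s.2 ++ [y]], ([] : List String))
      else (s.1, s.2 ++ [y])) = pvStep 4 (fun c => [c]) := by
    funext s y; simp [pvStep]
  rw [hfB]
  have h4 := pv_foldEmit 4 (fun c => [c]) B [] [] (Nat.zero_le 4)
  beta_reduce at h4
  rw [h4]
  simp only [List.nil_append, List.flatMap_singleton']
  have hfA : (fun (s : List (List String × List String) × List String) x =>
      if (s.2 ++ [x]).length = 3
      then (s.1 ++ (pvChunksRec 4 B).map (fun cb => (s.2 ++ [x], cb)), ([] : List String))
      else (s.1, s.2 ++ [x]))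
      = pvStep 2 (fun c => (pvChunksRec 4 B).map (fun cb => (c, cb))) := by
    funext s x; simp [pvStep]
  rw [hfA]
  have h2 := pv_foldEmit 2 (fun c => (pvChunksRec 4 B).map (fun cb => (c, cb))) A [] []
    (Nat.zero_le 2)
  rw [h2]
  simp only [List.nil_append]
  rw [← pv_table_eq 2 3 (by norm_num) A, ← pv_table_eq 4 5 (by norm_num) B,
      ← pv_chunks_eq A 3 (by omega), ← pv_chunks_eq B 5 (by omega)]
  simp only [List.flatMap_map, List.map_map, Function.comp_def]
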